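-- pv_equiv track=rewrite | github.com/jaredwindover/Uniquepwd | uniquePWD.py | uniquePrefix
-- ===== SOURCE A (Python) =====
-- def uniquePrefix(x, y):
--   if len(x) > len(y) :
--     y += "a"
--   r = ""
--   for xc, yc in zip(x,y):
--     r += xc
--     if xc!=yc:
--       break
--   return r
-- ===== SOURCE B (Python) =====
-- def uniquePrefix(x, y):
--   if len(x) > len(y):
--     y += "a"
--   n = min(len(x), len(y))
--   for i in range(n):
--     if x[i] != y[i]:
--       return x[:i+1]
--   return x[:n]
-- ===== Notes on version B (the rewrite author's own statement) =====
-- stated objective: simpler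
-- what changed: B finds the first divergence index by direct index scan and returns one slice of x, instead of A's accumulator that rebuilds the prefix character by character over zip(x,y).
import Mathlib
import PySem

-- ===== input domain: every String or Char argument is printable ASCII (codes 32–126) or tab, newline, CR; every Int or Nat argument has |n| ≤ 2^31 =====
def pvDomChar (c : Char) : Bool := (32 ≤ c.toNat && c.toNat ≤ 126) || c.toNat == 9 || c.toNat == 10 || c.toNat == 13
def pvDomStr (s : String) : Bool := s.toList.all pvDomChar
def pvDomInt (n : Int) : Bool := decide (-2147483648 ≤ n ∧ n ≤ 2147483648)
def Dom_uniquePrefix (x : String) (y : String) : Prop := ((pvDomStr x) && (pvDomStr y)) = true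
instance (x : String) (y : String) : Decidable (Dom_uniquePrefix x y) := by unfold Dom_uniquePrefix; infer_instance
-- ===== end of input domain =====

-- B replaces A's character-by-character accumulator with a direct scan for the first
-- divergence index followed by a single slice of x (objective: simpler).


-- ===== PORT A =====
-- A's loop over zip(x, y'): r += xc, then break on the first mismatch.
def pvLoopA : List (Char × Char) → List Char → List Char
  | [], r => r
  | (xc, yc) :: rest, r =>
      if xc ≠ yc then r ++ [xc] else pvLoopA rest (r ++ [xc])

def uniquePrefix (x : String) (y : String) : String :=
  let ycs : List Char :=
    if PySem.Str.len x > PySem.Str.len y then y.toList ++ ['a'] else y.toList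
  String.ofList (pvLoopA (x.toList.zip ycs) [])

-- ===== PORT B =====
-- B's index scan: first index where x[i] ≠ y[i] gives x[:i+1]; fall-through gives x[:n].
def pvScanB : List Char → List Char → Nat → Nat
  | a :: as, b :: bs, i => if a ≠ b then i + 1 else pvScanB as bs (i + 1)
  | _, _, i => i

def uniquePrefix_alt (x : String) (y : String) : String :=
  let ycs : List Char :=
    if PySem.Str.len x > PySem.Str.len y then y.toList ++ ['a'] else y.toList
  String.ofList (x.toList.take (pvScanB x.toList ycs 0))

-- ===== PRECONDITION & SPEC =====
def Spec_uniquePrefix (x : String) (y : String) (out : String) : Prop := out = uniquePrefix_alt x y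
instance (x : String) (y : String) (out : String) : Decidable (Spec_uniquePrefix x y out) := by unfold Spec_uniquePrefix; infer_instance

-- ===== CLAIM (what is proved, stated in full; the proofs are below) =====
def Claim_equal_uniquePrefix : Prop := ∀ (x : String) (y : String), Dom_uniquePrefix x y → Spec_uniquePrefix x y (uniquePrefix x y)

-- ===== LEMMAS AND PROOFS =====

theorem pvScanB_shift (xs ys : List Char) (i : Nat) :
    pvScanB xs ys i = i + pvScanB xs ys 0 := by
  induction xs generalizing ys i with
  | nil => simp [pvScanB]
  | cons a as ih =>
    cases ys with
    | nil => simp [pvScanB]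
    | cons b bs =>
      by_cases h : a = b
      · simp only [pvScanB, h, ne_eq, not_true_eq_false, if_false]
        rw [ih bs (i + 1), ih bs (0 + 1)]
        omega
      · simp [pvScanB, h]

theorem pvLoopA_eq_take (xs ys : List Char) (r : List Char) :
    pvLoopA (xs.zip ys) r = r ++ xs.take (pvScanB xs ys 0) := by
  induction xs generalizing ys r with
  | nil => simp [pvLoopA, pvScanB]
  | cons a as ih =>
    cases ys with
    | nil => simp [pvLoopA, pvScanB]
    | cons b bs =>
      by_cases h : a = b
      · simp only [List.zip_cons_cons, pvLoopA, pvScanB, h, ne_eq, not_true_eq_false, if_false]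
        rw [ih, pvScanB_shift as bs (0 + 1), Nat.add_comm 1, List.take_succ_cons]
        simp
      · simp [pvLoopA, pvScanB, h]

-- ===== VERDICT (by name: the statement is the Claim_ definition above) =====
theorem uniquePrefix_spec : Claim_equal_uniquePrefix := by
  intro x y _
  simp only [Spec_uniquePrefix, uniquePrefix, uniquePrefix_alt, pvLoopA_eq_take,
    List.nil_append]
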